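-- pv_equiv track=rewrite | github.com/jgraeb/MergeUnitTests | intersection/receding_horizon_winsets_intersection.py | get_system_states
-- ===== SOURCE A (Python) =====
-- def get_system_states(state_dict):
--     x_min_grid = 0
--     x_max_grid = 7
--     y_min_grid = 0
--     y_max_grid = 7
--     sys_states = []
--     for ii in range(x_min_grid,x_max_grid):
--         for jj in range(y_min_grid,y_max_grid):
--             if (ii,jj) in state_dict:
--                 sys_states.append((ii,jj))
--     return sys_states
-- ===== SOURCE B (Python) =====
-- def get_system_states(state_dict):
--     in_grid = {k for k in state_dict if 0 <= k[0] < 7 and 0 <= k[1] < 7}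
--     return sorted(in_grid)
-- ===== Notes on version B (the rewrite author's own statement) =====
-- stated objective: simpler
-- what changed: Replaces the nested 7x7 grid scan probing the dict cell by cell with a single filtered pass over the dict's keys, deduplicated as a set and sorted to reproduce A's row-major (lexicographic) order.
import Mathlib
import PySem

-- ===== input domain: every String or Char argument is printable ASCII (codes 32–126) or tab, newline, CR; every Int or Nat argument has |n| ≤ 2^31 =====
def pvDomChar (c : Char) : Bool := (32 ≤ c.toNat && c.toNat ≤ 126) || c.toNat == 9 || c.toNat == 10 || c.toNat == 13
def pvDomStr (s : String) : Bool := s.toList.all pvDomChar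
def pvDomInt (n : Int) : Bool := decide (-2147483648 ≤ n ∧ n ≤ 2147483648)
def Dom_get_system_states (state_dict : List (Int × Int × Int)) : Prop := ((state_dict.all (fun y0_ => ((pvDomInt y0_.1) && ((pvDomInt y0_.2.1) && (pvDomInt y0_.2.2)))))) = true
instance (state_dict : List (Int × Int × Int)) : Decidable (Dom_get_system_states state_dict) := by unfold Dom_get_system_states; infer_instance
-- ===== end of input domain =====

-- B replaces A's 7x7 grid scan with one filtered pass over the keys plus a sort (simpler).

-- ===== PORT A =====
def get_system_states (state_dict : List (Int × Int × Int)) : List (Int × Int) :=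
  (PySem.List.pyRange 0 7 1).foldl (fun sys_states ii =>
    (PySem.List.pyRange 0 7 1).foldl (fun sys_states jj =>
      if state_dict.any (fun kv => kv.1 == ii && kv.2.1 == jj) then
        sys_states ++ [(ii, jj)]
      else sys_states) sys_states) []

-- ===== PORT B =====
-- sorted(in_grid): Python tuple comparison is lexicographic; since every element of
-- in_grid has 0 ≤ x and 0 ≤ y < 7, the key 7*x + y realizes that order exactly.
def get_system_states_alt (state_dict : List (Int × Int × Int)) : List (Int × Int) :=
  let in_grid : PySem.Set (Int × Int) :=
    PySem.Set.ofList ((state_dict.map (fun kv => (kv.1, kv.2.1))).filter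
      (fun k => decide (0 ≤ k.1) && decide (k.1 < 7) && decide (0 ≤ k.2) && decide (k.2 < 7)))
  PySem.List.sorted in_grid (fun p => 7 * p.1 + p.2) false

-- ===== PRECONDITION & SPEC =====
def Spec_get_system_states (state_dict : List (Int × Int × Int)) (out : List (Int × Int)) : Prop := out = get_system_states_alt state_dict
instance (state_dict : List (Int × Int × Int)) (out : List (Int × Int)) : Decidable (Spec_get_system_states state_dict out) := by unfold Spec_get_system_states; infer_instance

-- ===== CLAIM (what is proved, stated in full; the proofs are below) =====
def Claim_equal_get_system_states : Prop := ∀ (state_dict : List (Int × Int × Int)), Dom_get_system_states state_dict → Spec_get_system_states state_dict (get_system_states state_dict)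

-- ===== LEMMAS AND PROOFS =====

-- the row-major grid and the membership predicate of A
def pvGrid : List (Int × Int) :=
  (PySem.List.pyRange 0 7 1).flatMap (fun ii => (PySem.List.pyRange 0 7 1).map (fun jj => (ii, jj)))

def pvPred (state_dict : List (Int × Int × Int)) (p : Int × Int) : Bool :=
  state_dict.any (fun kv => kv.1 == p.1 && kv.2.1 == p.2)

theorem pv_filter_flatMap {α β : Type} (l : List α) (h : α → List β) (q : β → Bool) :
    (l.flatMap h).filter q = l.flatMap (fun x => (h x).filter q) := by
  induction l with
  | nil => simp
  | cons a t ih => simp [List.flatMap_cons, List.filter_append, ih]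

theorem pvA_eq_filter (sd : List (Int × Int × Int)) :
    get_system_states sd = pvGrid.filter (pvPred sd) := by
  unfold get_system_states pvGrid
  rw [pv_filter_flatMap]
  have inner : ∀ (ii : Int) (acc : List (Int × Int)),
      (PySem.List.pyRange 0 7 1).foldl (fun sys_states jj =>
        if sd.any (fun kv => kv.1 == ii && kv.2.1 == jj) then sys_states ++ [(ii, jj)]
        else sys_states) acc
      = acc ++ ((PySem.List.pyRange 0 7 1).map (fun jj => (ii, jj))).filter (pvPred sd) := by
    intro ii acc
    rw [PySem.List.foldl_append_if (p := fun jj => sd.any (fun kv => kv.1 == ii && kv.2.1 == jj))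
      (f := fun jj => (ii, jj))]
    rw [List.filter_map]
    rfl
  calc (PySem.List.pyRange 0 7 1).foldl (fun sys_states ii =>
          (PySem.List.pyRange 0 7 1).foldl (fun sys_states jj =>
            if sd.any (fun kv => kv.1 == ii && kv.2.1 == jj) then sys_states ++ [(ii, jj)]
            else sys_states) sys_states) []
      = (PySem.List.pyRange 0 7 1).foldl (fun acc ii =>
          acc ++ ((PySem.List.pyRange 0 7 1).map (fun jj => (ii, jj))).filter (pvPred sd)) [] := by
        apply PySem.List.foldl_congr_mem
        intro acc ii _; exact inner ii acc
    _ = _ := by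
        rw [PySem.List.foldl_append_eq_flatMap]; simp

theorem pvGrid_pairwise : pvGrid.Pairwise (fun a b : Int × Int => 7 * a.1 + a.2 < 7 * b.1 + b.2) := by
  decide

theorem pvGrid_mem (p : Int × Int) : p ∈ pvGrid ↔ (0 ≤ p.1 ∧ p.1 < 7 ∧ 0 ≤ p.2 ∧ p.2 < 7) := by
  unfold pvGrid
  simp only [List.mem_flatMap, List.mem_map, PySem.List.mem_pyRange_one]
  constructor
  · rintro ⟨ii, hii, jj, hjj, rfl⟩; exact ⟨hii.1, hii.2, hjj.1, hjj.2⟩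
  · rintro ⟨h1, h2, h3, h4⟩; exact ⟨p.1, ⟨h1, h2⟩, p.2, ⟨h3, h4⟩, rfl⟩

theorem pvA_pairwise (sd : List (Int × Int × Int)) :
    (get_system_states sd).Pairwise (fun a b : Int × Int => 7 * a.1 + a.2 < 7 * b.1 + b.2) := by
  rw [pvA_eq_filter]
  exact pvGrid_pairwise.sublist List.filter_sublist

theorem pvA_nodup (sd : List (Int × Int × Int)) : (get_system_states sd).Nodup := by
  refine (pvA_pairwise sd).imp ?_
  intro a b h hab; subst hab; omega

theorem pvA_mem (sd : List (Int × Int × Int)) (p : Int × Int) :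
    p ∈ get_system_states sd ↔
      ((0 ≤ p.1 ∧ p.1 < 7 ∧ 0 ≤ p.2 ∧ p.2 < 7) ∧ (p.1, p.2) ∈ sd.map (fun kv => (kv.1, kv.2.1))) := by
  rw [pvA_eq_filter, List.mem_filter, pvGrid_mem]
  unfold pvPred
  simp only [List.any_eq_true, Bool.and_eq_true, beq_iff_eq, List.mem_map]
  constructor
  · rintro ⟨hr, kv, hkv, h1, h2⟩
    exact ⟨hr, kv, hkv, by rw [h1, h2]⟩
  · rintro ⟨hr, kv, hkv, h⟩
    refine ⟨hr, kv, hkv, ?_, ?_⟩ <;> [exact congrArg Prod.fst h; exact congrArg Prod.snd h]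

-- ===== VERDICT (by name: the statement is the Claim_ definition above) =====
theorem get_system_states_spec : Claim_equal_get_system_states := by
  intro sd _
  unfold Spec_get_system_states get_system_states_alt
  simp only []
  set fl := (sd.map (fun kv => (kv.1, kv.2.1))).filter
      (fun k => decide (0 ≤ k.1) && decide (k.1 < 7) && decide (0 ≤ k.2) && decide (k.2 < 7)) with hfl
  have hset : PySem.Set.ofList fl = PySem.List.dedup fl := (PySem.List.dedup_eq_ofList fl).symm
  rw [hset]
  refine Eq.symm (PySem.List.sorted_eq_of_perm_of_pairwise_lt _ _ (fun p : Int × Int => 7 * p.1 + p.2) ?_ (pvA_pairwise sd))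
  rw [List.perm_ext_iff_of_nodup (pvA_nodup sd) (PySem.List.nodup_dedup fl)]
  intro p
  rw [pvA_mem, PySem.List.mem_dedup, hfl, List.mem_filter]
  simp only [Bool.and_eq_true, decide_eq_true_eq]
  constructor
  · rintro ⟨⟨h1, h2, h3, h4⟩, hm⟩
    exact ⟨by simpa using hm, ⟨⟨h1, h2⟩, h3⟩, h4⟩
  · rintro ⟨hm, ⟨⟨h1, h2⟩, h3⟩, h4⟩
    exact ⟨⟨h1, h2, h3, h4⟩, by simpa using hm⟩
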